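-- pv_equiv track=rewrite | github.com/npuneil/Data-Prep-Demo | src/normalizer.py | _calculate_field_coverage
-- ===== SOURCE A (Python) =====
-- from typing import Optional, Dict, List, Any, Tuple
--
-- def _calculate_field_coverage(records: List[Dict[str, Any]]) -> Dict[str, bool]:
--     """Calculate which schema fields are covered."""
--     all_fields = set()
--     for record in records:
--         for key in record:
--             if not key.startswith('_'):
--                 all_fields.add(key)
--
--     schema_fields = [
--         'SecId', 'ISIN', 'CUSIP', 'Ticker', 'LegalName', 'FundFamily',
--         'CategoryName', 'GlobalAssetClassId', 'InceptionDate', 'BaseCurrency',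
--         'NAV', 'NAVDate', 'TotalNetAssets', 'ExpenseRatio', 'Yield',
--         'Return_1M', 'Return_3M', 'Return_YTD', 'Return_1Y',
--         'Return_3Y', 'Return_5Y', 'Return_10Y',
--         'StandardDeviation_3Y', 'SharpeRatio_3Y', 'Beta_3Y', 'Alpha_3Y',
--         'StarRating', 'AnalystRating', 'StyleBox',
--         'TopHoldings', 'SectorWeights'
--     ]
--
--     return {f: f in all_fields for f in schema_fields}
-- ===== SOURCE B (Python) =====
-- def _calculate_field_coverage(records):
--     """Calculate which schema fields are covered."""
--     schema_fields = [
--         'SecId', 'ISIN', 'CUSIP', 'Ticker', 'LegalName', 'FundFamily',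
--         'CategoryName', 'GlobalAssetClassId', 'InceptionDate', 'BaseCurrency',
--         'NAV', 'NAVDate', 'TotalNetAssets', 'ExpenseRatio', 'Yield',
--         'Return_1M', 'Return_3M', 'Return_YTD', 'Return_1Y',
--         'Return_3Y', 'Return_5Y', 'Return_10Y',
--         'StandardDeviation_3Y', 'SharpeRatio_3Y', 'Beta_3Y', 'Alpha_3Y',
--         'StarRating', 'AnalystRating', 'StyleBox',
--         'TopHoldings', 'SectorWeights'
--     ]
--     return {f: any(f in record for record in records) for f in schema_fields}
-- ===== Notes on version B (the rewrite author's own statement) =====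
-- stated objective: simpler
-- what changed: B drops the intermediate all_fields set (and the irrelevant underscore filter, since no schema field starts with '_') and instead tests each schema field directly against the records with any(); index-build-then-lookup becomes a direct short-circuiting per-field scan.
import Mathlib
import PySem

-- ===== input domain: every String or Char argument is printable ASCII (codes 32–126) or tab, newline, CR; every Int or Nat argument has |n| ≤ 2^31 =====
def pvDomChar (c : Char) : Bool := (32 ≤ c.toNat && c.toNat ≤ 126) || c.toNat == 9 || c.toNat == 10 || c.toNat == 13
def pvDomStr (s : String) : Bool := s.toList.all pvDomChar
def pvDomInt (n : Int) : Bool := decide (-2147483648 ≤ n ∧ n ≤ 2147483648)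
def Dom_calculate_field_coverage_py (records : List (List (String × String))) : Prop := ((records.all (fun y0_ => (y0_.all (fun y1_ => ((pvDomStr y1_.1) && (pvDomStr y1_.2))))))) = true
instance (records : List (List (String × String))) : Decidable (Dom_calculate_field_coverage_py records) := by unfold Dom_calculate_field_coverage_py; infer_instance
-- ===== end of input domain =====

-- B replaces A's build-a-key-set-then-look-up pass by a direct any()-scan of the records per schema field (simpler; same result since no schema field starts with '_').


-- the schema_fields literal, shared verbatim by both ports
def pvSchemaFields : List String :=
  ["SecId", "ISIN", "CUSIP", "Ticker", "LegalName", "FundFamily",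
   "CategoryName", "GlobalAssetClassId", "InceptionDate", "BaseCurrency",
   "NAV", "NAVDate", "TotalNetAssets", "ExpenseRatio", "Yield",
   "Return_1M", "Return_3M", "Return_YTD", "Return_1Y",
   "Return_3Y", "Return_5Y", "Return_10Y",
   "StandardDeviation_3Y", "SharpeRatio_3Y", "Beta_3Y", "Alpha_3Y",
   "StarRating", "AnalystRating", "StyleBox",
   "TopHoldings", "SectorWeights"]

-- ===== PORT A =====
-- builds all_fields as a Python set of the non-underscore keys, then looks each schema field up
def calculate_field_coverage_py (records : List (List (String × String))) : List (String × Bool) :=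
  let all_fields : PySem.Set String :=
    records.foldl (fun s record =>
      record.foldl (fun s kv =>
        if !(PySem.Str.startswith kv.1 "_") then PySem.Set.add s kv.1 else s) s)
      PySem.Set.empty
  pvSchemaFields.map (fun f => (f, PySem.Set.contains all_fields f))

-- ===== PORT B =====
-- no intermediate set: any(f in record for record in records), per schema field
def calculate_field_coverage_py_alt (records : List (List (String × String))) : List (String × Bool) :=
  pvSchemaFields.map (fun f => (f, records.any (fun record => record.any (fun kv => kv.1 == f))))

-- ===== PRECONDITION & SPEC =====
def Spec_calculate_field_coverage_py (records : List (List (String × String))) (out : List (String × Bool)) : Prop := out = calculate_field_coverage_py_alt records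
instance (records : List (List (String × String))) (out : List (String × Bool)) : Decidable (Spec_calculate_field_coverage_py records out) := by unfold Spec_calculate_field_coverage_py; infer_instance

-- ===== CLAIM (what is proved, stated in full; the proofs are below) =====
def Claim_equal_calculate_field_coverage_py : Prop := ∀ (records : List (List (String × String))), Dom_calculate_field_coverage_py records → Spec_calculate_field_coverage_py records (calculate_field_coverage_py records)

-- ===== LEMMAS AND PROOFS =====
lemma pv_contains_iff {s : PySem.Set String} {f : String} :
    PySem.Set.contains s f = true ↔ f ∈ s := by
  simp [PySem.Set.contains]

-- membership in the inner fold over one record, for a field not starting with '_'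
lemma pv_inner_mem (f : String) (hf : PySem.Str.startswith f "_" = false)
    (r : List (String × String)) (s : PySem.Set String) :
    (f ∈ r.foldl (fun s kv =>
        if !(PySem.Str.startswith kv.1 "_") then PySem.Set.add s kv.1 else s) s)
      ↔ (f ∈ s ∨ r.any (fun kv => kv.1 == f) = true) := by
  induction r generalizing s with
  | nil => simp
  | cons kv r ih =>
    simp only [List.foldl_cons, List.any_cons, Bool.or_eq_true]
    rw [ih]
    by_cases hs : PySem.Str.startswith kv.1 "_" = false
    · rw [show (if (!PySem.Str.startswith kv.1 "_") = true then PySem.Set.add s kv.1 else s)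
            = PySem.Set.add s kv.1 from by rw [hs]; rfl]
      rw [PySem.Set.mem_add]
      by_cases hk : kv.1 = f
      · subst hk; simp
      · have hne : (kv.1 == f) = false := by simp [hk]
        rw [hne]
        have : ¬ f = kv.1 := fun h => hk h.symm
        tauto
    · have hs' : PySem.Str.startswith kv.1 "_" = true := by
        cases h : PySem.Str.startswith kv.1 "_" with
        | false => exact absurd h hs
        | true => rfl
      rw [show (if (!PySem.Str.startswith kv.1 "_") = true then PySem.Set.add s kv.1 else s)
            = s from by rw [hs']; rfl]
      have hk : kv.1 ≠ f := fun h => by rw [h, hf] at hs'; exact Bool.false_ne_true hs'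
      have hne : (kv.1 == f) = false := by simp [hk]
      rw [hne]
      tauto

lemma pv_outer_mem (f : String) (hf : PySem.Str.startswith f "_" = false)
    (records : List (List (String × String))) (s : PySem.Set String) :
    (f ∈ records.foldl (fun s record =>
        record.foldl (fun s kv =>
          if !(PySem.Str.startswith kv.1 "_") then PySem.Set.add s kv.1 else s) s) s)
      ↔ (f ∈ s ∨ records.any (fun record => record.any (fun kv => kv.1 == f)) = true) := by
  induction records generalizing s with
  | nil => simp
  | cons r rs ih =>
    simp only [List.foldl_cons, List.any_cons, Bool.or_eq_true]
    rw [ih, pv_inner_mem f hf]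
    tauto

lemma pv_schema_no_underscore :
    ∀ f ∈ pvSchemaFields, PySem.Str.startswith f "_" = false := by decide

-- ===== VERDICT (by name: the statement is the Claim_ definition above) =====
theorem calculate_field_coverage_py_spec : Claim_equal_calculate_field_coverage_py := by
  intro records _
  unfold Spec_calculate_field_coverage_py calculate_field_coverage_py calculate_field_coverage_py_alt
  apply List.map_congr_left
  intro f hfmem
  have hf := pv_schema_no_underscore f hfmem
  have h := pv_outer_mem f hf records PySem.Set.empty
  rw [show (f ∈ (PySem.Set.empty : PySem.Set String)) ↔ False from by
        simp [PySem.Set.empty], false_or] at h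
  have hEq : PySem.Set.contains
      (records.foldl (fun s record =>
        record.foldl (fun s kv =>
          if !(PySem.Str.startswith kv.1 "_") then PySem.Set.add s kv.1 else s) s)
        PySem.Set.empty) f
      = records.any (fun record => record.any (fun kv => kv.1 == f)) := by
    by_cases hm : f ∈ records.foldl (fun s record =>
        record.foldl (fun s kv =>
          if !(PySem.Str.startswith kv.1 "_") then PySem.Set.add s kv.1 else s) s)
        PySem.Set.empty
    · rw [pv_contains_iff.mpr hm, h.mp hm]
    · have h2 : PySem.Set.contains
          (records.foldl (fun s record =>
            record.foldl (fun s kv =>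
              if !(PySem.Str.startswith kv.1 "_") then PySem.Set.add s kv.1 else s) s)
            PySem.Set.empty) f = false := by
        cases hc : PySem.Set.contains _ f with
        | false => rfl
        | true => exact absurd (pv_contains_iff.mp hc) hm
      have h3 : records.any (fun record => record.any (fun kv => kv.1 == f)) = false := by
        cases hb : records.any (fun record => record.any (fun kv => kv.1 == f)) with
        | false => rfl
        | true => exact absurd (h.mpr hb) hm
      rw [h2, h3]
  rw [Prod.mk.injEq]
  exact ⟨rfl, hEq⟩
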